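-- pv_equiv track=rewrite | github.com/Britva4ka/lectures | hw16/hw16.py | chesboard_pattern
-- ===== SOURCE A (Python) =====
-- def chesboard_pattern(width, height):
--     """chesboard = []
--     for i in range(height):
--         pattern = []
--         for j in range(width):
--             if i % 2 == 0:
--                 if j % 2 == 0:
--                     pattern.append(0)
--                 else:
--                     pattern.append(1)
--             else:
--                 if j % 2 == 0:
--                     pattern.append(1)
--                 else:
--                     pattern.append(0)
--         chesboard.append(pattern)
--     return chesboard"""
--
--     chessboard = []
--     pattern = [0, 1]
--     for i in range(height):
--         if i % 2 == 0:
--             if width % 2 == 0: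
--                 raw = pattern * int(width / 2)
--             else:
--                 raw = (pattern * int((width + 1) / 2))[:-1]
--         else:
--             if width % 2 == 0:
--                 raw = pattern[::-1] * int(width / 2)
--             else:
--                 raw = (pattern[::-1] * int((width + 1) / 2))[:-1]
--         chessboard.append(raw)
--     return chessboard
-- ===== SOURCE B (Python) =====
-- def chesboard_pattern(width, height):
--     return [[(i + j) % 2 for j in range(width)] for i in range(height)]
-- ===== Notes on version B (the rewrite author's own statement) =====
-- stated objective: simpler
-- what changed: Replaces the row-template replication/slicing (duplicate [0,1], multiply, reverse for odd rows, trim with [:-1]) by a one-line per-cell parity formula (i+j)%2 in a nested comprehension.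
import Mathlib
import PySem

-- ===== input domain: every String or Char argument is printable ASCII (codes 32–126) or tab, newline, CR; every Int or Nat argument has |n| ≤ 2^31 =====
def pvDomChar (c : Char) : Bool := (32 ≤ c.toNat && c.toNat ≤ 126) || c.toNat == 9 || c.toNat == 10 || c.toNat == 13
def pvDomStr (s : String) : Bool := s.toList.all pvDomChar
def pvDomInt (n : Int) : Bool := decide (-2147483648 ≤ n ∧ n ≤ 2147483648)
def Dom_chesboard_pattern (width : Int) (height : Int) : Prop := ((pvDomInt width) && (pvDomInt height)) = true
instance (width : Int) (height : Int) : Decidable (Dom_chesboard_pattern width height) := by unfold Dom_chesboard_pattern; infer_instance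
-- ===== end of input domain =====

-- B replaces A's row-template replication/slicing by a per-cell parity formula (i+j)%2; same asymptotic cost, simpler.

-- ===== PORT A =====
-- Python `pattern * n` is [] for n ≤ 0: (·).toNat is exact there; `int(width / 2)` is
-- PySem.Int.truncdiv (exact, |width| ≤ 2^31 < 2^53); `[:-1]` is PySem.List.slice none (some (-1));
-- `pattern[::-1]` is List.reverse (PySem.List.slice?_none_none_neg_one).
def chesboard_pattern (width : Int) (height : Int) : List (List Int) :=
  (PySem.List.pyRange 0 height 1).foldl
    (fun chessboard i =>
      let pattern : List Int := [0, 1]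
      let raw : List Int :=
        if PySem.Int.mod i 2 = 0 then
          if PySem.Int.mod width 2 = 0 then
            (List.replicate (PySem.Int.truncdiv width 2).toNat pattern).flatten
          else
            PySem.List.slice ((List.replicate (PySem.Int.truncdiv (width + 1) 2).toNat pattern).flatten) none (some (-1))
        else
          if PySem.Int.mod width 2 = 0 then
            (List.replicate (PySem.Int.truncdiv width 2).toNat pattern.reverse).flatten
          else
            PySem.List.slice ((List.replicate (PySem.Int.truncdiv (width + 1) 2).toNat pattern.reverse).flatten) none (some (-1))
      chessboard ++ [raw])
    []

-- ===== PORT B =====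
def chesboard_pattern_alt (width : Int) (height : Int) : List (List Int) :=
  (PySem.List.pyRange 0 height 1).map (fun i =>
    (PySem.List.pyRange 0 width 1).map (fun j => PySem.Int.mod (i + j) 2))

-- ===== PRECONDITION & SPEC =====
def Spec_chesboard_pattern (width : Int) (height : Int) (out : List (List Int)) : Prop := out = chesboard_pattern_alt width height
instance (width : Int) (height : Int) (out : List (List Int)) : Decidable (Spec_chesboard_pattern width height out) := by unfold Spec_chesboard_pattern; infer_instance

-- ===== CLAIM (what is proved, stated in full; the proofs are below) =====
def Claim_equal_chesboard_pattern : Prop := ∀ (width : Int) (height : Int), Dom_chesboard_pattern width height → Spec_chesboard_pattern width height (chesboard_pattern width height)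

-- ===== LEMMAS AND PROOFS =====

-- pattern * n, flattened, is the alternating 0/1 (or 1/0) row of length 2n
lemma flatten_replicate_pair (a b : Int) (n : Nat) :
    (List.replicate n ([a, b] : List Int)).flatten
      = (List.range (2 * n)).map (fun k => if k % 2 = 0 then a else b) := by
  induction n with
  | zero => simp
  | succ n ih =>
      have h2 : 2 * (n + 1) = 2 + 2 * n := by ring
      rw [List.replicate_succ, List.flatten_cons, ih, h2, List.range_add]
      simp [List.range_succ, Function.comp_def, Nat.add_mod_left]

lemma row_eq (width i : Int) (hi : 0 ≤ i) :
    (if PySem.Int.mod i 2 = 0 then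
        if PySem.Int.mod width 2 = 0 then
          (List.replicate (PySem.Int.truncdiv width 2).toNat ([0, 1] : List Int)).flatten
        else
          PySem.List.slice ((List.replicate (PySem.Int.truncdiv (width + 1) 2).toNat ([0, 1] : List Int)).flatten) none (some (-1))
      else
        if PySem.Int.mod width 2 = 0 then
          (List.replicate (PySem.Int.truncdiv width 2).toNat (([0, 1] : List Int)).reverse).flatten
        else
          PySem.List.slice ((List.replicate (PySem.Int.truncdiv (width + 1) 2).toNat (([0, 1] : List Int)).reverse).flatten) none (some (-1)))
    = (PySem.List.pyRange 0 width 1).map (fun j => PySem.Int.mod (i + j) 2) := by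
  -- B's row as a map over List.range
  have hR : (PySem.List.pyRange 0 width 1).map (fun j => PySem.Int.mod (i + j) 2)
      = (List.range width.toNat).map (fun k => (((i.toNat + k) % 2 : Nat) : Int)) := by
    rw [PySem.List.pyRange_one]
    simp only [Int.sub_zero]
    rw [List.map_map]
    congr 1
    funext k
    simp only [Function.comp_apply, zero_add]
    rw [← Int.toNat_of_nonneg hi]
    exact_mod_cast PySem.Int.mod_natCast (i.toNat + k) 2
  rw [hR]
  rcases le_or_gt width 0 with hw | hw
  · -- width ≤ 0: every branch is the empty row
    have h1 : (PySem.Int.truncdiv width 2).toNat = 0 := by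
      have e : PySem.Int.truncdiv width 2 = -Int.tdiv (-width) 2 := by
        simp only [PySem.Int.truncdiv]; rw [← Int.neg_tdiv, neg_neg]
      rw [e, Int.tdiv_eq_ediv_of_nonneg (show (0:Int) ≤ -width by omega)]
      omega
    have h2 : (PySem.Int.truncdiv (width + 1) 2).toNat = 0 := by
      rcases eq_or_lt_of_le hw with h0 | h0
      · rw [h0]; decide
      · have e : PySem.Int.truncdiv (width + 1) 2 = -Int.tdiv (-(width + 1)) 2 := by
          simp only [PySem.Int.truncdiv]; rw [← Int.neg_tdiv, neg_neg]
        rw [e, Int.tdiv_eq_ediv_of_nonneg (show (0:Int) ≤ -(width + 1) by omega)]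
        omega
    have h3 : width.toNat = 0 := by omega
    split_ifs <;> simp [h1, h2, h3, PySem.List.slice_to_neg_one]
  · -- width > 0
    have hwn : width = (width.toNat : Int) := by omega
    have hin : i = (i.toNat : Int) := by omega
    have hmodw : PySem.Int.mod width 2 = ((width.toNat % 2 : Nat) : Int) := by
      rw [hwn]; exact_mod_cast PySem.Int.mod_natCast width.toNat 2
    have hmodi : PySem.Int.mod i 2 = ((i.toNat % 2 : Nat) : Int) := by
      rw [hin]; exact_mod_cast PySem.Int.mod_natCast i.toNat 2
    have hdiv : (PySem.Int.truncdiv width 2).toNat = width.toNat / 2 := by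
      simp only [PySem.Int.truncdiv]
      rw [Int.tdiv_eq_ediv_of_nonneg (by omega)]; omega
    have hdiv1 : (PySem.Int.truncdiv (width + 1) 2).toNat = (width.toNat + 1) / 2 := by
      simp only [PySem.Int.truncdiv]
      rw [Int.tdiv_eq_ediv_of_nonneg (by omega)]; omega
    rcases Nat.mod_two_eq_zero_or_one i.toNat with hie | hio
    all_goals rcases Nat.mod_two_eq_zero_or_one width.toNat with hwe | hwo
    -- i even, width even
    · rw [if_pos (by rw [hmodi]; omega), if_pos (by rw [hmodw]; omega),
        hdiv, flatten_replicate_pair]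
      rw [show 2 * (width.toNat / 2) = width.toNat by omega]
      exact List.map_congr_left fun k _ => by split_ifs with h <;> omega
    -- i even, width odd
    · rw [if_pos (by rw [hmodi]; omega), if_neg (by rw [hmodw]; omega),
        hdiv1, flatten_replicate_pair, PySem.List.slice_to_neg_one]
      rw [show 2 * ((width.toNat + 1) / 2) = width.toNat + 1 by omega,
        List.range_succ, List.map_append]
      simp only [List.map_cons, List.map_nil, List.dropLast_concat]
      exact List.map_congr_left fun k _ => by split_ifs with h <;> omega
    -- i odd, width even
    · rw [if_neg (by rw [hmodi]; omega), if_pos (by rw [hmodw]; omega),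
        hdiv]
      simp only [List.reverse_cons, List.reverse_nil, List.nil_append, List.cons_append]
      rw [flatten_replicate_pair]
      rw [show 2 * (width.toNat / 2) = width.toNat by omega]
      exact List.map_congr_left fun k _ => by split_ifs with h <;> omega
    -- i odd, width odd
    · rw [if_neg (by rw [hmodi]; omega), if_neg (by rw [hmodw]; omega),
        hdiv1]
      simp only [List.reverse_cons, List.reverse_nil, List.nil_append, List.cons_append]
      rw [flatten_replicate_pair, PySem.List.slice_to_neg_one]
      rw [show 2 * ((width.toNat + 1) / 2) = width.toNat + 1 by omega,
        List.range_succ, List.map_append]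
      simp only [List.map_cons, List.map_nil, List.dropLast_concat]
      exact List.map_congr_left fun k _ => by split_ifs with h <;> omega

-- ===== VERDICT (by name: the statement is the Claim_ definition above) =====
theorem chesboard_pattern_spec : Claim_equal_chesboard_pattern := by
  intro width height _
  unfold Spec_chesboard_pattern chesboard_pattern chesboard_pattern_alt
  rw [PySem.List.foldl_append_singleton_eq_map]
  exact List.map_congr_left (fun i hi =>
    row_eq width i ((PySem.List.mem_pyRange_one.mp hi).1))
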